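-- pv_equiv track=rewrite | github.com/BudEcosystem/simulator | BudSimulator/LoRA/injection.py | should_inject_lora
-- ===== SOURCE A (Python) =====
-- from typing import List, Tuple, TYPE_CHECKING
--
-- def should_inject_lora(layer_name: str, target_modules: List[str]) -> bool:
--     """Check if LoRA should be injected for this layer based on target modules."""
--     layer_name_lower = layer_name.lower()
--
--     # Map common operation names to module types
--     op_to_module = {
--         'qkv': 'attn',
--         'out proj': 'attn',
--         'query': 'attn',
--         'key': 'attn',
--         'value': 'attn',
--         'up+gate': 'ffn',
--         'down': 'ffn',
--         'up': 'ffn',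
--         'gate': 'ffn',
--         'w1': 'ffn',
--         'w2': 'ffn',
--         'w3': 'ffn',
--     }
--
--     # Check if the operation name matches any known patterns
--     for op_pattern, module_type in op_to_module.items():
--         if op_pattern in layer_name_lower and module_type in target_modules:
--             return True
--
--     # Also check direct matches
--     for target in target_modules:
--         target_lower = target.lower()
--         if target_lower in layer_name_lower:
--             return True
--
--     return False
-- ===== SOURCE B (Python) =====
-- # B: one pass over target_modules consulting a grouped module->patterns index
-- # (instead of A's scan of the flat pattern->module dict plus a second loop).
--
-- _MODULE_TO_PATTERNS = {
--     'attn': ['qkv', 'out proj', 'query', 'key', 'value'],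
--     'ffn': ['up+gate', 'down', 'up', 'gate', 'w1', 'w2', 'w3'],
-- }
--
-- def should_inject_lora(layer_name, target_modules):
--     """Check if LoRA should be injected for this layer based on target modules."""
--     layer_name_lower = layer_name.lower()
--     for target in target_modules:
--         patterns = _MODULE_TO_PATTERNS.get(target)
--         if patterns is not None and any(p in layer_name_lower for p in patterns):
--             return True
--         if target.lower() in layer_name_lower:
--             return True
--     return False
-- ===== Notes on version B (the rewrite author's own statement) =====
-- stated objective: alternative
-- what changed: B makes a single pass over target_modules consulting a grouped module->patterns reverse index (and checks the direct substring match in the same pass), instead of A's scan of the flat pattern->module dict followed by a second loop over target_modules.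
import Mathlib
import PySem

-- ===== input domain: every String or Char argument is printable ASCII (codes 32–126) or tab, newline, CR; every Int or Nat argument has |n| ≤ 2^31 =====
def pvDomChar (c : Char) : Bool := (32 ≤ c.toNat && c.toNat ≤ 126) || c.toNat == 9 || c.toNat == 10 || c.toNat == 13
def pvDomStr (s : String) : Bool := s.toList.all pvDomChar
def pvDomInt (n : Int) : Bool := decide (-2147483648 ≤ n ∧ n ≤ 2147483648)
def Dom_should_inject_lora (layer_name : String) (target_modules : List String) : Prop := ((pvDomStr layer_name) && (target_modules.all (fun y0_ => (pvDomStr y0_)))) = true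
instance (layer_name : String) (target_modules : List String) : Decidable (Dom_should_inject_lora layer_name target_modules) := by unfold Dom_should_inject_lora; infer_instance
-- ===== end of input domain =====

-- B differs from A only in decomposition: one pass over target_modules with a grouped
-- module->patterns index, instead of A's flat pattern->module scan plus a second loop.

-- ===== PORT A =====
-- the op_to_module dict, in insertion order (iterated via .items())
def pvOpToModule : List (String × String) :=
  [("qkv", "attn"), ("out proj", "attn"), ("query", "attn"), ("key", "attn"), ("value", "attn"),
   ("up+gate", "ffn"), ("down", "ffn"), ("up", "ffn"), ("gate", "ffn"),
   ("w1", "ffn"), ("w2", "ffn"), ("w3", "ffn")]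

def should_inject_lora (layer_name : String) (target_modules : List String) : Bool :=
  let layer_name_lower := PySem.Str.lower layer_name
  -- first loop: over op_to_module items (early return True = any);
  -- then second loop: over target_modules (early return True = any); else False
  pvOpToModule.any (fun pm =>
      PySem.Str.isIn pm.1 layer_name_lower && target_modules.contains pm.2)
  || target_modules.any (fun target =>
      PySem.Str.isIn (PySem.Str.lower target) layer_name_lower)

-- ===== PORT B =====
def pvAttnPatterns : List String := ["qkv", "out proj", "query", "key", "value"]
def pvFfnPatterns : List String := ["up+gate", "down", "up", "gate", "w1", "w2", "w3"]

def should_inject_lora_alt (layer_name : String) (target_modules : List String) : Bool :=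
  let layer_name_lower := PySem.Str.lower layer_name
  -- single pass: grouped index lookup (keys 'attn'/'ffn'), then the direct substring check
  target_modules.any (fun target =>
    (target == "attn" && pvAttnPatterns.any (fun p => PySem.Str.isIn p layer_name_lower))
    || (target == "ffn" && pvFfnPatterns.any (fun p => PySem.Str.isIn p layer_name_lower))
    || PySem.Str.isIn (PySem.Str.lower target) layer_name_lower)

-- ===== PRECONDITION & SPEC =====
def Spec_should_inject_lora (layer_name : String) (target_modules : List String) (out : Bool) : Prop := out = should_inject_lora_alt layer_name target_modules
instance (layer_name : String) (target_modules : List String) (out : Bool) : Decidable (Spec_should_inject_lora layer_name target_modules out) := by unfold Spec_should_inject_lora; infer_instance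

-- ===== CLAIM (what is proved, stated in full; the proofs are below) =====
def Claim_equal_should_inject_lora : Prop := ∀ (layer_name : String) (target_modules : List String), Dom_should_inject_lora layer_name target_modules → Spec_should_inject_lora layer_name target_modules (should_inject_lora layer_name target_modules)

-- ===== LEMMAS AND PROOFS =====

-- ===== VERDICT (by name: the statement is the Claim_ definition above) =====
theorem should_inject_lora_spec : Claim_equal_should_inject_lora := by
  intro layer_name target_modules _
  unfold Spec_should_inject_lora should_inject_lora should_inject_lora_alt
  simp only [pvOpToModule, pvAttnPatterns, pvFfnPatterns]
  rw [Bool.eq_iff_iff]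
  simp only [List.any_cons, List.any_nil, List.any_eq_true, List.contains_eq_mem,
    Bool.or_eq_true, Bool.and_eq_true, beq_iff_eq, decide_eq_true_eq,
    Bool.false_eq_true, or_false]
  constructor
  · rintro ((⟨hp, hm⟩ | ⟨hp, hm⟩ | ⟨hp, hm⟩ | ⟨hp, hm⟩ | ⟨hp, hm⟩ |
        ⟨hp, hm⟩ | ⟨hp, hm⟩ | ⟨hp, hm⟩ | ⟨hp, hm⟩ | ⟨hp, hm⟩ | ⟨hp, hm⟩ | ⟨hp, hm⟩) | ⟨t, ht, hin⟩)
    · exact ⟨_, hm, Or.inl (Or.inl ⟨rfl, Or.inl (hp)⟩)⟩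
    · exact ⟨_, hm, Or.inl (Or.inl ⟨rfl, Or.inr (Or.inl (hp))⟩)⟩
    · exact ⟨_, hm, Or.inl (Or.inl ⟨rfl, Or.inr (Or.inr (Or.inl (hp)))⟩)⟩
    · exact ⟨_, hm, Or.inl (Or.inl ⟨rfl, Or.inr (Or.inr (Or.inr (Or.inl (hp))))⟩)⟩
    · exact ⟨_, hm, Or.inl (Or.inl ⟨rfl, Or.inr (Or.inr (Or.inr (Or.inr (hp))))⟩)⟩
    · exact ⟨_, hm, Or.inl (Or.inr ⟨rfl, Or.inl (hp)⟩)⟩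
    · exact ⟨_, hm, Or.inl (Or.inr ⟨rfl, Or.inr (Or.inl (hp))⟩)⟩
    · exact ⟨_, hm, Or.inl (Or.inr ⟨rfl, Or.inr (Or.inr (Or.inl (hp)))⟩)⟩
    · exact ⟨_, hm, Or.inl (Or.inr ⟨rfl, Or.inr (Or.inr (Or.inr (Or.inl (hp))))⟩)⟩
    · exact ⟨_, hm, Or.inl (Or.inr ⟨rfl, Or.inr (Or.inr (Or.inr (Or.inr (Or.inl (hp)))))⟩)⟩
    · exact ⟨_, hm, Or.inl (Or.inr ⟨rfl, Or.inr (Or.inr (Or.inr (Or.inr (Or.inr (Or.inl (hp))))))⟩)⟩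
    · exact ⟨_, hm, Or.inl (Or.inr ⟨rfl, Or.inr (Or.inr (Or.inr (Or.inr (Or.inr (Or.inr (hp))))))⟩)⟩
    · exact ⟨t, ht, Or.inr hin⟩
  · rintro ⟨t, ht, ((⟨rfl, (hp | hp | hp | hp | hp)⟩ | ⟨rfl, (hp | hp | hp | hp | hp | hp | hp)⟩) | hin)⟩
    · exact Or.inl (Or.inl (⟨hp, ht⟩))
    · exact Or.inl (Or.inr (Or.inl (⟨hp, ht⟩)))
    · exact Or.inl (Or.inr (Or.inr (Or.inl (⟨hp, ht⟩))))
    · exact Or.inl (Or.inr (Or.inr (Or.inr (Or.inl (⟨hp, ht⟩)))))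
    · exact Or.inl (Or.inr (Or.inr (Or.inr (Or.inr (Or.inl (⟨hp, ht⟩))))))
    · exact Or.inl (Or.inr (Or.inr (Or.inr (Or.inr (Or.inr (Or.inl (⟨hp, ht⟩)))))))
    · exact Or.inl (Or.inr (Or.inr (Or.inr (Or.inr (Or.inr (Or.inr (Or.inl (⟨hp, ht⟩))))))))
    · exact Or.inl (Or.inr (Or.inr (Or.inr (Or.inr (Or.inr (Or.inr (Or.inr (Or.inl (⟨hp, ht⟩)))))))))
    · exact Or.inl (Or.inr (Or.inr (Or.inr (Or.inr (Or.inr (Or.inr (Or.inr (Or.inr (Or.inl (⟨hp, ht⟩))))))))))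
    · exact Or.inl (Or.inr (Or.inr (Or.inr (Or.inr (Or.inr (Or.inr (Or.inr (Or.inr (Or.inr (Or.inl (⟨hp, ht⟩)))))))))))
    · exact Or.inl (Or.inr (Or.inr (Or.inr (Or.inr (Or.inr (Or.inr (Or.inr (Or.inr (Or.inr (Or.inr (Or.inl (⟨hp, ht⟩))))))))))))
    · exact Or.inl (Or.inr (Or.inr (Or.inr (Or.inr (Or.inr (Or.inr (Or.inr (Or.inr (Or.inr (Or.inr (Or.inr (⟨hp, ht⟩))))))))))))
    · exact Or.inr ⟨t, ht, hin⟩
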